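-- pv_equiv track=rewrite | github.com/YantraMultiPhysics/Yantra_Legacy | setup.py | get_compiler_options
-- ===== SOURCE A (Python) =====
-- def get_compiler_options(compiler:str)->tuple:
--     """
--     Get compiler options based on the compiler name
--     """
--     compiler_options = {
--     "gnu": ["g95", "gnu95", "mingw32"],
--     "intel": ["intel", "intelm", "intelem", "intelv", "intelvem"],
--     "pg": ["pg", "pgfortran", "pgf90", "pgf95"]
--     }
--
--     compile_args = {
--         "gnu": ["-fopenmp", "-fPIC", "-O3", "-fbounds-check", "-mtune=native"],
--         "intel": ["-qopenmp", "-O3", "-funroll-loops"],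
--         "pg": ["-mp"],
--         "default": ["-fopenmp", "-O3"]
--     }
--
--     link_args = {
--         "gnu": ["-lgomp"],
--         "intel": ["-liomp5"],
--         "pg": [],
--         "default": ["-lgomp"]
--     }
--
--     for key, compilers in compiler_options.items():
--         if compiler in compilers:
--             return compile_args[key], link_args[key]
--     return compile_args["default"], link_args["default"]
-- ===== SOURCE B (Python) =====
-- def get_compiler_options(compiler: str) -> tuple:
--     """
--     Get compiler options based on the compiler name
--     """
--     gnu = (["-fopenmp", "-fPIC", "-O3", "-fbounds-check", "-mtune=native"], ["-lgomp"])
--     intel = (["-qopenmp", "-O3", "-funroll-loops"], ["-liomp5"])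
--     pg = (["-mp"], [])
--     # one flat table sorted by compiler name, searched by binary search
--     table = [
--         ("g95", gnu),
--         ("gnu95", gnu),
--         ("intel", intel),
--         ("intelem", intel),
--         ("intelm", intel),
--         ("intelv", intel),
--         ("intelvem", intel),
--         ("mingw32", gnu),
--         ("pg", pg),
--         ("pgf90", pg),
--         ("pgf95", pg),
--         ("pgfortran", pg),
--     ]
--     lo, hi = 0, len(table)
--     while lo < hi:
--         mid = (lo + hi) // 2
--         if table[mid][0] < compiler:
--             lo = mid + 1
--         else:
--             hi = mid
--     if lo < len(table) and table[lo][0] == compiler: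
--         return table[lo][1]
--     return (["-fopenmp", "-O3"], ["-lgomp"])
-- ===== Notes on version B (the rewrite author's own statement) =====
-- stated objective: alternative
-- what changed: Replaces A's scan over per-family name lists with one flat table of (name, flags) entries sorted by name and a hand-written binary search (bisect_left then equality check), falling back to the shared default flags when the name is absent.
import Mathlib
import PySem

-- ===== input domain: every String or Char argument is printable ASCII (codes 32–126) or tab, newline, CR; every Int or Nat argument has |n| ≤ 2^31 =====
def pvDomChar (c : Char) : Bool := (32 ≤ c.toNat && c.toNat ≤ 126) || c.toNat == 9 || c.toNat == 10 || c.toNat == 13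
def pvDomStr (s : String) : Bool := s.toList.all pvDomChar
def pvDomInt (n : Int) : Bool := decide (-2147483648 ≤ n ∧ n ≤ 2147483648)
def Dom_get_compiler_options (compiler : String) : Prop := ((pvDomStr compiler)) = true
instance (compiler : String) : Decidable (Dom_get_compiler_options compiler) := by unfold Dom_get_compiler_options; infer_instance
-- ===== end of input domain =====

-- B replaces A's scan over per-family name lists with a flat name-sorted table searched by binary search (alternative algorithm, same result).

-- ===== PORT A =====
def pvCompilerOptions : PySem.Dict String (List String) :=
  PySem.Dict.ofList [("gnu", ["g95", "gnu95", "mingw32"]),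
   ("intel", ["intel", "intelm", "intelem", "intelv", "intelvem"]),
   ("pg", ["pg", "pgfortran", "pgf90", "pgf95"])]

def pvCompileArgs : PySem.Dict String (List String) :=
  PySem.Dict.ofList [("gnu", ["-fopenmp", "-fPIC", "-O3", "-fbounds-check", "-mtune=native"]),
   ("intel", ["-qopenmp", "-O3", "-funroll-loops"]),
   ("pg", ["-mp"]),
   ("default", ["-fopenmp", "-O3"])]

def pvLinkArgs : PySem.Dict String (List String) :=
  PySem.Dict.ofList [("gnu", ["-lgomp"]),
   ("intel", ["-liomp5"]),
   ("pg", []),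
   ("default", ["-lgomp"])]

-- the 'for key, compilers in compiler_options.items(): if compiler in compilers: return …' loop with early return
def pvLoopA (compiler : String) : List (String × List String) → List String × List String
  | [] => (pvCompileArgs.getD "default" [], pvLinkArgs.getD "default" [])
  | (key, compilers) :: rest =>
    if compiler ∈ compilers then (pvCompileArgs.getD key [], pvLinkArgs.getD key [])
    else pvLoopA compiler rest

def get_compiler_options (compiler : String) : List String × List String :=
  pvLoopA compiler pvCompilerOptions.items

-- ===== PORT B =====
def pvGnuPair : List String × List String :=
  (["-fopenmp", "-fPIC", "-O3", "-fbounds-check", "-mtune=native"], ["-lgomp"])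
def pvIntelPair : List String × List String :=
  (["-qopenmp", "-O3", "-funroll-loops"], ["-liomp5"])
def pvPgPair : List String × List String := (["-mp"], [])

-- the flat table sorted by compiler name (Source B's `table`)
def pvTable : List (String × (List String × List String)) :=
  [("g95", pvGnuPair), ("gnu95", pvGnuPair),
   ("intel", pvIntelPair), ("intelem", pvIntelPair), ("intelm", pvIntelPair),
   ("intelv", pvIntelPair), ("intelvem", pvIntelPair),
   ("mingw32", pvGnuPair),
   ("pg", pvPgPair), ("pgf90", pvPgPair), ("pgf95", pvPgPair), ("pgfortran", pvPgPair)]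

-- Source B's `while lo < hi` bisect-left loop (fuel ≥ hi - lo, so the recursion mirrors the loop exactly)
def pvBsearch (compiler : String) (t : List (String × (List String × List String))) :
    Nat → Nat → Nat → Nat
  | 0, lo, _ => lo
  | fuel+1, lo, hi =>
    if lo < hi then
      -- string '<' ported as code-point-lexicographic comparison on toList (exact for Python's str <)
      if (t.getD ((lo + hi) / 2) ("", ([], []))).1.toList < compiler.toList then
        pvBsearch compiler t fuel ((lo + hi) / 2 + 1) hi
      else
        pvBsearch compiler t fuel lo ((lo + hi) / 2)
    else lo

def get_compiler_options_alt (compiler : String) : List String × List String :=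
  match pvTable[pvBsearch compiler pvTable pvTable.length 0 pvTable.length]? with
  | some e => if e.1 = compiler then e.2 else (["-fopenmp", "-O3"], ["-lgomp"])
  | none => (["-fopenmp", "-O3"], ["-lgomp"])

-- ===== PRECONDITION & SPEC =====
def Spec_get_compiler_options (compiler : String) (out : List String × List String) : Prop := out = get_compiler_options_alt compiler
instance (compiler : String) (out : List String × List String) : Decidable (Spec_get_compiler_options compiler out) := by unfold Spec_get_compiler_options; infer_instance

-- ===== CLAIM (what is proved, stated in full; the proofs are below) =====
def Claim_equal_get_compiler_options : Prop := ∀ (compiler : String), Dom_get_compiler_options compiler → Spec_get_compiler_options compiler (get_compiler_options compiler)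

-- ===== LEMMAS AND PROOFS =====

-- if the name is in no family, B falls through to the shared default
theorem alt_default (c : String) (h : c ∉ pvTable.map Prod.fst) :
    get_compiler_options_alt c = (["-fopenmp", "-O3"], ["-lgomp"]) := by
  unfold get_compiler_options_alt
  cases hm : pvTable[pvBsearch c pvTable pvTable.length 0 pvTable.length]? with
  | none => simp
  | some e =>
    have hmem : e ∈ pvTable := List.mem_of_getElem? hm
    have hne : e.1 ≠ c := fun he => h (he ▸ List.mem_map_of_mem hmem)
    simp [hne]

-- ===== VERDICT (by name: the statement is the Claim_ definition above) =====
theorem get_compiler_options_spec : Claim_equal_get_compiler_options := by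
  intro compiler _
  unfold Spec_get_compiler_options
  by_cases h0 : compiler = "g95"
  · subst h0; decide
  by_cases h1 : compiler = "gnu95"
  · subst h1; decide
  by_cases h2 : compiler = "mingw32"
  · subst h2; decide
  by_cases h3 : compiler = "intel"
  · subst h3; decide
  by_cases h4 : compiler = "intelm"
  · subst h4; decide
  by_cases h5 : compiler = "intelem"
  · subst h5; decide
  by_cases h6 : compiler = "intelv"
  · subst h6; decide
  by_cases h7 : compiler = "intelvem"
  · subst h7; decide
  by_cases h8 : compiler = "pg"
  · subst h8; decide
  by_cases h9 : compiler = "pgfortran"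
  · subst h9; decide
  by_cases h10 : compiler = "pgf90"
  · subst h10; decide
  by_cases h11 : compiler = "pgf95"
  · subst h11; decide
  have hnot : compiler ∉ pvTable.map Prod.fst := by
    simp [pvTable, h0, h1, h2, h3, h4, h5, h6, h7, h8, h9, h10, h11]
  rw [alt_default compiler hnot]
  unfold get_compiler_options
  have hco : pvCompilerOptions.items =
      [("gnu", ["g95", "gnu95", "mingw32"]),
       ("intel", ["intel", "intelm", "intelem", "intelv", "intelvem"]),
       ("pg", ["pg", "pgfortran", "pgf90", "pgf95"])] := by decide
  rw [hco]
  simp [pvLoopA, h0, h1, h2, h3, h4, h5, h6, h7, h8, h9, h10, h11]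
  decide
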